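-- pv_equiv track=rewrite | github.com/Matribe/local-rag | src/utils/tuple_manage.py | add_size_tuple
-- ===== SOURCE A (Python) =====
-- def add_size_tuple(current_tuple: tuple, size: int) -> tuple:
--     tuple_length = len(current_tuple)
--     tuple_as_list = []
--
--     if tuple_length > size :
--         return current_tuple
--
--     for index in range(size):
--
--         if index < tuple_length :
--             tuple_as_list.append(current_tuple[index])
--         else:
--             tuple_as_list.append(None)
--
--     augmented_tuple = tuple(tuple_as_list)
--     return augmented_tuple
-- ===== SOURCE B (Python) =====
-- def add_size_tuple(current_tuple: tuple, size: int) -> tuple: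
--     if len(current_tuple) > size:
--         return current_tuple
--     return current_tuple + (None,) * (size - len(current_tuple))
-- ===== Notes on version B (the rewrite author's own statement) =====
-- stated objective: simpler
-- what changed: Replaces the per-index loop with its copy-or-pad branch by a closed-form concatenation of the tuple with a replicated block of Nones sized by the length deficit.
import Mathlib
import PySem

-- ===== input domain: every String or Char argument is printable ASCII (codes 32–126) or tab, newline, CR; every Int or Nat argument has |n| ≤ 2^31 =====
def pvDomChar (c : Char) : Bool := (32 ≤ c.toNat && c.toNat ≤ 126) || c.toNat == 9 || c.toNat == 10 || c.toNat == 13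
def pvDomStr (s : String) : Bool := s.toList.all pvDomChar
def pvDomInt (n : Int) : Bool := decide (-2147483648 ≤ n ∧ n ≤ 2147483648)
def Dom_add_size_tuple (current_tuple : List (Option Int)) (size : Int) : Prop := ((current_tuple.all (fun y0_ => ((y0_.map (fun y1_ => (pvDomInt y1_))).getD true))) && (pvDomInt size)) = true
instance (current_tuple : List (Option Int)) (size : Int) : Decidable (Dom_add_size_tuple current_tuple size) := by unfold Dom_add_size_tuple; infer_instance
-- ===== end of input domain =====

-- B replaces A's per-index loop (copy or pad each position) with a closed-form concatenation: simpler.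


-- ===== PORT A =====
-- literal port: length, an accumulator list, the guard, then a loop over range(size)
-- appending current_tuple[index] (in range, so pyGetD is exact here) or None
def add_size_tuple (current_tuple : List (Option Int)) (size : Int) : List (Option Int) :=
  let tuple_length : Int := current_tuple.length
  if tuple_length > size then current_tuple
  else
    (PySem.List.pyRange 0 size 1).foldl
      (fun tuple_as_list index =>
        if index < tuple_length then
          tuple_as_list ++ [PySem.List.pyGetD current_tuple index none]
        else
          tuple_as_list ++ [none]) []

-- ===== PORT B =====
def add_size_tuple_alt (current_tuple : List (Option Int)) (size : Int) : List (Option Int) :=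
  if current_tuple.length > size then current_tuple
  else current_tuple ++ List.replicate (size - current_tuple.length).toNat none

-- ===== PRECONDITION & SPEC =====
def Spec_add_size_tuple (current_tuple : List (Option Int)) (size : Int) (out : List (Option Int)) : Prop := out = add_size_tuple_alt current_tuple size
instance (current_tuple : List (Option Int)) (size : Int) (out : List (Option Int)) : Decidable (Spec_add_size_tuple current_tuple size out) := by unfold Spec_add_size_tuple; infer_instance

-- ===== CLAIM (what is proved, stated in full; the proofs are below) =====
def Claim_equal_add_size_tuple : Prop := ∀ (current_tuple : List (Option Int)) (size : Int), Dom_add_size_tuple current_tuple size → Spec_add_size_tuple current_tuple size (add_size_tuple current_tuple size)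

-- ===== LEMMAS AND PROOFS =====

-- A's loop over range(0, b) produces the first b.toNat positions: element or None.
theorem add_size_loop_eq (xs : List (Option Int)) (b : Int) (hb : 0 ≤ b) :
    (PySem.List.pyRange 0 b 1).foldl
      (fun acc index =>
        if index < (xs.length : Int) then
          acc ++ [PySem.List.pyGetD xs index none]
        else
          acc ++ [none]) []
    = xs.take b.toNat ++ List.replicate (b - min b (xs.length : Int)).toNat none := by
  lift b to ℕ using hb with n
  induction n with
  | zero =>
      simp [PySem.List.pyRange_one_eq_nil]
  | succ n ih =>
      have hb : (0 : Int) ≤ (n : Int) := by positivity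
      have hcast : ((n + 1 : Nat) : Int) = (n : Int) + 1 := by push_cast; ring
      rw [hcast, PySem.List.pyRange_one_succ_right hb, List.foldl_append, ih]
      set b : Int := (n : Int) with hbdef
      by_cases h : b < (xs.length : Int)
      · have h1 : min b (xs.length : Int) = b := by omega
        have h2 : min (b + 1) (xs.length : Int) = b + 1 := by omega
        have hbn : b.toNat < xs.length := by omega
        simp only [List.foldl_cons, List.foldl_nil, if_pos h, h1, h2]
        rw [PySem.List.pyGetD_of_nonneg]
        rw [List.getD_eq_getElem _ _ hbn]
        have : (b + 1).toNat = b.toNat + 1 := by omega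
        rw [this, List.take_add_one]
        simp [hbn]
        exact hb
      · have h1 : min b (xs.length : Int) = (xs.length : Int) := by omega
        have h2 : min (b + 1) (xs.length : Int) = (xs.length : Int) := by omega
        have ht : xs.take b.toNat = xs := List.take_of_length_le (by omega)
        have ht' : xs.take (b + 1).toNat = xs := List.take_of_length_le (by omega)
        simp only [List.foldl_cons, List.foldl_nil, if_neg h, h1, h2, ht, ht']
        rw [List.append_assoc]
        congr 1
        have : (b + 1 - (xs.length : Int)).toNat = (b - (xs.length : Int)).toNat + 1 := by omega
        rw [this, List.replicate_succ']

-- ===== VERDICT (by name: the statement is the Claim_ definition above) =====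
theorem add_size_tuple_spec : Claim_equal_add_size_tuple := by
  intro xs size _
  unfold Spec_add_size_tuple add_size_tuple add_size_tuple_alt
  by_cases h : (xs.length : Int) > size
  · simp [h]
  · have hb : 0 ≤ size := by omega
    simp only [if_neg h]
    rw [add_size_loop_eq xs size hb]
    have h1 : min size (xs.length : Int) = (xs.length : Int) := by omega
    have h2 : xs.take size.toNat = xs := List.take_of_length_le (by omega)
    rw [h1, h2]
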